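-- pv_equiv track=rewrite | github.com/btaille/tagger | utils.py | char_index
-- ===== SOURCE A (Python) =====
-- def char_index(sents):
--     c2idx = {}
--     for s in sents:
--         for w in s:
--             for c in w:
--                 if c not in c2idx:
--                     c2idx[c] = len(c2idx) + 1
--
--     idx2c = {v: k for k, v in c2idx.items()}
--     return c2idx, idx2c
-- ===== SOURCE B (Python) =====
-- def char_index(sents):
--     stream = [c for s in sents for w in s for c in w]
--     first = {}
--     for i, c in reversed(list(enumerate(stream))):
--         first[c] = i            # reverse pass: the last write per char is its FIRST occurrence index
--     uniques = sorted(first, key=first.get)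
--     c2idx = {c: i for i, c in enumerate(uniques, 1)}
--     idx2c = {i: c for i, c in enumerate(uniques, 1)}
--     return c2idx, idx2c
-- ===== Notes on version B (the rewrite author's own statement) =====
-- stated objective: alternative
-- what changed: B never tests membership: a reverse pass over the enumerated character stream overwrites a position dict so each char keeps its first-occurrence index, then the chars are SORTED by that index and numbered from 1 to build both maps.
import Mathlib
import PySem

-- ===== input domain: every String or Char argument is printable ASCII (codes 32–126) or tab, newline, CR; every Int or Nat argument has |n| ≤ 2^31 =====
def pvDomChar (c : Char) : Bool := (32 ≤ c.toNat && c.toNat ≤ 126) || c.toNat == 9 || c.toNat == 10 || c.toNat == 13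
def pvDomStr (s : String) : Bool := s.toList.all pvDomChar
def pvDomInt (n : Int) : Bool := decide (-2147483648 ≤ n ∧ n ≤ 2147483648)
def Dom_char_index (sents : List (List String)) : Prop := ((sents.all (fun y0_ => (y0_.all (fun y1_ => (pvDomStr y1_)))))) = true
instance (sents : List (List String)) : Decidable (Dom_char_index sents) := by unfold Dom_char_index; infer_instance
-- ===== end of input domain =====

-- B drops A's membership-tested accumulation: a reverse overwrite pass records each char's
-- first-occurrence index, then sorting by that index and numbering from 1 yields both maps.

-- ===== PORT A =====
def char_index (sents : List (List String)) : (List (String × Int)) × (List (Int × String)) :=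
  let c2idx : PySem.Dict String Int :=
    sents.foldl (fun d s =>
      s.foldl (fun d w =>
        w.toList.foldl (fun d c =>
          if d.contains (String.ofList [c]) then d
          else d.insert (String.ofList [c]) ((d.size : Int) + 1)) d) d) PySem.Dict.empty
  let idx2c : PySem.Dict Int String :=
    c2idx.items.foldl (fun d kv => d.insert kv.2 kv.1) PySem.Dict.empty
  (c2idx.items, idx2c.items)

-- ===== PORT B =====
def char_index_alt (sents : List (List String)) : (List (String × Int)) × (List (Int × String)) :=
  let stream : List String :=
    sents.flatMap (fun s => s.flatMap (fun w => w.toList.map (fun c => String.ofList [c])))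
  let first : PySem.Dict String Int :=
    ((PySem.List.enumerate stream 0).reverse).foldl (fun d p => d.insert p.2 p.1) PySem.Dict.empty
  let uniques : List String :=
    PySem.List.sorted first.keys (fun c => first.getD c 0) false
  let c2idx : PySem.Dict String Int :=
    (PySem.List.enumerate uniques 1).foldl (fun d p => d.insert p.2 p.1) PySem.Dict.empty
  let idx2c : PySem.Dict Int String :=
    (PySem.List.enumerate uniques 1).foldl (fun d p => d.insert p.1 p.2) PySem.Dict.empty
  (c2idx.items, idx2c.items)

-- ===== PRECONDITION & SPEC =====
def Spec_char_index (sents : List (List String)) (out : (List (String × Int)) × (List (Int × String))) : Prop := out = char_index_alt sents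
instance (sents : List (List String)) (out : (List (String × Int)) × (List (Int × String))) : Decidable (Spec_char_index sents out) := by unfold Spec_char_index; infer_instance

-- ===== CLAIM (what is proved, stated in full; the proofs are below) =====
def Claim_equal_char_index : Prop := ∀ (sents : List (List String)), Dom_char_index sents → Spec_char_index sents (char_index sents)

-- ===== LEMMAS AND PROOFS =====

-- dict built by numbering a (nodup) key list from 1, the common normal form of both sides
def mkD (us : List String) : PySem.Dict String Int :=
  (PySem.List.enumerate us 1).foldl (fun d p => d.insert p.2 p.1) PySem.Dict.empty

theorem mkD_items (us : List String) (h : us.Nodup) :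
    (mkD us).items = (PySem.List.enumerate us 1).map (fun p => (p.2, p.1)) := by
  unfold mkD
  have := PySem.Dict.items_foldl_insert_fresh (l := PySem.List.enumerate us 1)
      (k := fun p => p.2) (v := fun p => p.1) (d := (PySem.Dict.empty : PySem.Dict String Int))
      (by intro a _; simp) (by simpa [PySem.List.map_snd_enumerate] using h)
  simpa using this

theorem mkD_keys (us : List String) (h : us.Nodup) : (mkD us).keys = us := by
  simp only [PySem.Dict.keys, mkD_items us h]
  simp [List.map_map, Function.comp_def]

theorem mkD_size (us : List String) (h : us.Nodup) : (mkD us).size = us.length := by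
  simp [PySem.Dict.size, mkD_items us h, PySem.List.length_enumerate]

theorem mkD_contains (us : List String) (h : us.Nodup) (c : String) :
    (mkD us).contains c = decide (c ∈ us) := by
  rw [PySem.Dict.contains_eq_decide_mem_keys, mkD_keys us h]

theorem mkD_snoc (us : List String) (h : us.Nodup) (c : String) (hc : c ∉ us) :
    (mkD us).insert c (((mkD us).size : Int) + 1) = mkD (us ++ [c]) := by
  have hn : (us ++ [c]).Nodup := by simp [List.nodup_append, h]; exact fun a ha e => hc (e ▸ ha)
  apply PySem.Dict.ext
  rw [PySem.Dict.items_insert_of_not_contains, mkD_items us h, mkD_items _ hn,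
      PySem.List.enumerate_append, List.map_append, mkD_size us h]
  · simp [PySem.List.enumerate]; omega
  · rw [mkD_contains us h c]; simpa using hc

theorem loop_eq (cs : List String) : ∀ (us : List String), us.Nodup →
    cs.foldl (fun d c => if d.contains c then d else d.insert c ((d.size : Int) + 1)) (mkD us)
      = mkD (PySem.Set.update us cs) := by
  induction cs with
  | nil => intro us _; rfl
  | cons c cs ih =>
    intro us h
    by_cases hc : c ∈ us
    · have : PySem.Set.update us (c :: cs) = PySem.Set.update us cs := by
        simp [PySem.Set.update, hc]
      rw [this, List.foldl_cons, mkD_contains us h c, if_pos (by simpa using hc)]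
      exact ih us h
    · have hup : PySem.Set.update us (c :: cs) = PySem.Set.update (us ++ [c]) cs := by
        simp [PySem.Set.update, hc]
      rw [hup, List.foldl_cons, mkD_contains us h c, if_neg (by simpa using hc),
          mkD_snoc us h c hc]
      exact ih _ (by simp [List.nodup_append, h]; exact fun a ha e => hc (e ▸ ha))

theorem foldl_flat {α β γ : Type} (f : β → α → β) (g : γ → List α) (l : List γ) (b : β) :
    l.foldl (fun d x => (g x).foldl f d) b = (l.flatMap g).foldl f b := by
  induction l generalizing b with
  | nil => rfl
  | cons x l ih => simp [List.foldl_append, ih]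

-- get? of a "last write wins" insert fold, read back-to-front
theorem get?_foldl_insert_swap (l : List (Int × String)) (d : PySem.Dict String Int) (k : String) :
    (l.foldl (fun d p => d.insert p.2 p.1) d).get? k =
      match l.reverse.find? (fun p => p.2 == k) with
      | some p => some p.1
      | none => d.get? k := by
  induction l generalizing d with
  | nil => rfl
  | cons p l ih =>
    rw [List.foldl_cons, ih, List.reverse_cons, List.find?_append]
    cases hf : l.reverse.find? (fun p => p.2 == k) with
    | some q => simp
    | none =>
      by_cases he : p.2 = k
      · subst he; simp [List.find?, PySem.Dict.get?_insert_self]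
      · have hb : (p.2 == k) = false := beq_eq_false_iff_ne.mpr he
        simp [List.find?, hb, PySem.Dict.get?_insert_of_ne _ _ (Ne.symm he)]

theorem find?_enumerate_eq (xs : List String) (k : String) (s : Int) (hk : k ∈ xs) :
    (PySem.List.enumerate xs s).find? (fun p => p.2 == k) = some (s + (xs.idxOf k : Int), k) := by
  induction xs generalizing s with
  | nil => cases hk
  | cons x xs ih =>
    rw [PySem.List.enumerate_cons]
    by_cases he : x = k
    · subst he; simp [List.find?, List.idxOf_cons_self]
    · have hk' : k ∈ xs := by cases hk with
        | head => exact absurd rfl he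
        | tail _ h => exact h
      rw [List.find?_cons_of_neg (by simpa using he), ih (s + 1) hk',
          List.idxOf_cons_ne _ (by simpa using he)]
      congr 2
      push_cast
      ring

-- the value stored by B's reverse pass is the FIRST occurrence index
theorem first_getD (xs : List String) (k : String) (hk : k ∈ xs) :
    (((PySem.List.enumerate xs 0).reverse).foldl (fun d p => d.insert p.2 p.1)
        (PySem.Dict.empty : PySem.Dict String Int)).getD k 0 = (xs.idxOf k : Int) := by
  rw [PySem.Dict.getD_eq_get?_getD, get?_foldl_insert_swap, List.reverse_reverse,
      find?_enumerate_eq xs k 0 hk]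
  simp

theorem keys_first (xs : List String) :
    (((PySem.List.enumerate xs 0).reverse).foldl (fun d p => d.insert p.2 p.1)
        (PySem.Dict.empty : PySem.Dict String Int)).keys = PySem.Set.ofList xs.reverse := by
  rw [PySem.Dict.keys_foldl_insert_key (key := fun p : Int × String => p.2)
        (f := fun d p => p.1)]
  simp [PySem.Set.update_nil_left, List.map_reverse, PySem.List.map_snd_enumerate]

-- dedup lists first occurrences in strictly increasing idxOf order
theorem dedup_pairwise_idxOf (xs : List String) :
    (PySem.List.dedup xs).Pairwise (fun a b => (xs.idxOf a : Int) < (xs.idxOf b : Int)) := by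
  induction xs using List.reverseRecOn with
  | nil => simp [PySem.List.dedup]
  | append_singleton xs c ih =>
    have hded : PySem.List.dedup (xs ++ [c]) = PySem.Set.add (PySem.List.dedup xs) c := by
      simp only [PySem.List.dedup_eq_ofList, PySem.Set.ofList_eq_foldl, List.foldl_append,
        List.foldl_cons, List.foldl_nil]
    have hmem : ∀ a, a ∈ PySem.List.dedup xs → a ∈ xs := fun a ha => by
      simpa using (PySem.List.mem_dedup _ _).1 ha
    have hidx : ∀ a ∈ PySem.List.dedup xs, (xs ++ [c]).idxOf a = xs.idxOf a := fun a ha =>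
      List.idxOf_append_of_mem (hmem a ha)
    have ih' : (PySem.List.dedup xs).Pairwise
        (fun a b => ((xs ++ [c]).idxOf a : Int) < ((xs ++ [c]).idxOf b : Int)) := by
      refine ih.imp_of_mem ?_
      intro a b ha hb h
      rw [hidx a ha, hidx b hb]; exact h
    by_cases hc : c ∈ PySem.List.dedup xs
    · rw [hded, PySem.Set.add, if_pos (by simpa [PySem.Set.contains] using hc)]
      exact ih'
    · rw [hded, PySem.Set.add, if_neg (by simpa [PySem.Set.contains] using hc)]
      rw [List.pairwise_append]
      refine ⟨ih', List.pairwise_singleton _ _, ?_⟩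
      have hcx : c ∉ xs := fun h => hc ((PySem.List.mem_dedup _ _).2 h)
      intro a ha b hb
      simp only [List.mem_singleton] at hb
      rw [hb, hidx a ha, List.idxOf_append_of_notMem hcx]
      have : xs.idxOf a < xs.length := List.idxOf_lt_length_of_mem (hmem a ha)
      simp [List.idxOf_cons_self]
      omega

-- B's "uniques" list IS the dedup of the stream
theorem uniques_eq_dedup (xs : List String) :
    (let first : PySem.Dict String Int :=
      ((PySem.List.enumerate xs 0).reverse).foldl (fun d p => d.insert p.2 p.1) PySem.Dict.empty
     PySem.List.sorted first.keys (fun c => first.getD c 0) false) = PySem.List.dedup xs := by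
  simp only
  apply PySem.List.sorted_eq_of_perm_of_pairwise_lt
  · rw [keys_first]
    refine (List.perm_ext_iff_of_nodup (PySem.List.nodup_dedup xs)
      (PySem.Set.nodup_ofList _)).2 ?_
    intro a
    rw [PySem.List.mem_dedup, PySem.Set.mem_ofList, List.mem_reverse]
  · refine (dedup_pairwise_idxOf xs).imp_of_mem ?_
    intro a b ha hb h
    rw [first_getD xs a ((PySem.List.mem_dedup _ _).1 ha), first_getD xs b ((PySem.List.mem_dedup _ _).1 hb)]
    exact h

-- ===== VERDICT (by name: the statement is the Claim_ definition above) =====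
theorem char_index_spec : Claim_equal_char_index := by
  intro sents _
  unfold Spec_char_index char_index char_index_alt
  simp only
  set f : PySem.Dict String Int → String → PySem.Dict String Int :=
    fun d c => if d.contains c then d else d.insert c ((d.size : Int) + 1) with hf
  set chars : List String :=
    sents.flatMap (fun s => s.flatMap (fun w => w.toList.map (fun c => String.ofList [c]))) with hchars
  have hnd : (PySem.List.dedup chars).Nodup := PySem.List.nodup_dedup chars
  have hA : sents.foldl (fun d s =>
      s.foldl (fun d w =>
        w.toList.foldl (fun d c =>
          if d.contains (String.ofList [c]) then d
          else d.insert (String.ofList [c]) ((d.size : Int) + 1)) d) d) PySem.Dict.empty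
      = mkD (PySem.List.dedup chars) := by
    have h1 : ∀ (d : PySem.Dict String Int) (w : String),
        w.toList.foldl (fun d c =>
          if d.contains (String.ofList [c]) then d
          else d.insert (String.ofList [c]) ((d.size : Int) + 1)) d
        = (w.toList.map (fun c => String.ofList [c])).foldl f d := by
      intro d w; rw [List.foldl_map]
    have h2 : ∀ (d : PySem.Dict String Int) (s : List String),
        s.foldl (fun d w => (w.toList.map (fun c => String.ofList [c])).foldl f d) d
        = (s.flatMap (fun w => w.toList.map (fun c => String.ofList [c]))).foldl f d := by
      intro d s; exact foldl_flat f _ s d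
    calc sents.foldl (fun d s =>
          s.foldl (fun d w =>
            w.toList.foldl (fun d c =>
              if d.contains (String.ofList [c]) then d
              else d.insert (String.ofList [c]) ((d.size : Int) + 1)) d) d) PySem.Dict.empty
        = sents.foldl (fun d s =>
            (s.flatMap (fun w => w.toList.map (fun c => String.ofList [c]))).foldl f d)
            PySem.Dict.empty := by
          simp only [h1, h2]
      _ = chars.foldl f PySem.Dict.empty := foldl_flat f _ sents _
      _ = chars.foldl f (mkD []) := rfl
      _ = mkD (PySem.Set.update [] chars) := loop_eq chars [] List.nodup_nil
      _ = mkD (PySem.List.dedup chars) := by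
          rw [PySem.Set.update_nil_left, ← PySem.List.dedup_eq_ofList]
  rw [hA]
  have hU := uniques_eq_dedup chars
  simp only at hU
  rw [hU]
  have hB : (PySem.List.enumerate (PySem.List.dedup chars) 1).foldl
      (fun d p => d.insert p.2 p.1) PySem.Dict.empty = mkD (PySem.List.dedup chars) := rfl
  rw [hB]
  have hI : (mkD (PySem.List.dedup chars)).items.foldl
      (fun (d : PySem.Dict Int String) kv => d.insert kv.2 kv.1) PySem.Dict.empty
      = (PySem.List.enumerate (PySem.List.dedup chars) 1).foldl
          (fun d p => d.insert p.1 p.2) PySem.Dict.empty := by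
    rw [mkD_items _ hnd, List.foldl_map]
  rw [hI]
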